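-- pv_equiv track=rewrite | github.com/trishthakur/Mock-Interview-Agent | src/evaluator.py | _generate_followup
-- ===== SOURCE A (Python) =====
-- from typing import Dict, List
--
-- def _generate_followup(original_question: str, improvements: List[str]) -> str:
--     """Generate a follow-up question based on identified gaps."""
--     if any('example' in imp.lower() or 'specific' in imp.lower() for imp in improvements):
--         return "Can you provide a specific example with measurable results?"
--     elif any('structure' in imp.lower() or 'star' in imp.lower() for imp in improvements):
--         return "Can you walk me through the situation, your specific actions, and the results?"
--     elif any('detail' in imp.lower() for imp in improvements):
--         return "Can you elaborate on that with more context and details?"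
--     else:
--         return "Is there anything else you'd like to add to strengthen your answer?"
-- ===== SOURCE B (Python) =====
-- _RULES = [
--     (('example', 'specific'),
--      "Can you provide a specific example with measurable results?"),
--     (('structure', 'star'),
--      "Can you walk me through the situation, your specific actions, and the results?"),
--     (('detail',),
--      "Can you elaborate on that with more context and details?"),
-- ]
-- _DEFAULT = "Is there anything else you'd like to add to strengthen your answer?"
--
--
-- def _category(imp):
--     """Index of the highest-priority rule whose keyword occurs in imp (len(_RULES) if none)."""
--     low = imp.lower()
--     for i, (keywords, _) in enumerate(_RULES):
--         if any(k in low for k in keywords):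
--             return i
--     return len(_RULES)
--
--
-- def _generate_followup(original_question, improvements):
--     """Generate a follow-up question based on identified gaps."""
--     responses = [resp for _, resp in _RULES] + [_DEFAULT]
--     best = min(map(_category, improvements), default=len(_RULES))
--     return responses[best]
-- ===== Notes on version B (the rewrite author's own statement) =====
-- stated objective: alternative
-- what changed: Recasts A's hard-coded if/elif keyword scans as a data-driven rule table: each improvement is mapped to the numeric index of the highest-priority rule it matches, the minimum index over all improvements is taken, and that index selects the response from a table (default index when nothing matches or the list is empty).
import Mathlib
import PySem

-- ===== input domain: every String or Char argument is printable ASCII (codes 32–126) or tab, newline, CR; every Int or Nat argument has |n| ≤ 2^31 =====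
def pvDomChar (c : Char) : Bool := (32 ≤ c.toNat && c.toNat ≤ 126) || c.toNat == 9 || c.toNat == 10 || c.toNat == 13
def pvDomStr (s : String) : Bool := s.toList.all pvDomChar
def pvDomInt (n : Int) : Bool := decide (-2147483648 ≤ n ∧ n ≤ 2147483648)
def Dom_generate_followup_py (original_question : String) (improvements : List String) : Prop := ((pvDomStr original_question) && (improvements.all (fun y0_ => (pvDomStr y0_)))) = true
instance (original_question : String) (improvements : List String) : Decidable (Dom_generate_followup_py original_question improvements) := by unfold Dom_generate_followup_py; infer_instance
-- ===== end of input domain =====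

-- B replaces A's if/elif keyword scans by a data-driven rule table: map each improvement to its
-- best rule index, take the numeric minimum, index into the response table (alternative decomposition).

-- ===== PORT A =====
def generate_followup_py (original_question : String) (improvements : List String) : String :=
  if improvements.any (fun imp =>
      PySem.Str.isIn "example" (PySem.Str.lower imp) || PySem.Str.isIn "specific" (PySem.Str.lower imp)) then
    "Can you provide a specific example with measurable results?"
  else if improvements.any (fun imp =>
      PySem.Str.isIn "structure" (PySem.Str.lower imp) || PySem.Str.isIn "star" (PySem.Str.lower imp)) then
    "Can you walk me through the situation, your specific actions, and the results?"
  else if improvements.any (fun imp => PySem.Str.isIn "detail" (PySem.Str.lower imp)) then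
    "Can you elaborate on that with more context and details?"
  else
    "Is there anything else you'd like to add to strengthen your answer?"

-- ===== PORT B =====
-- the rule table (_RULES) and default response (_DEFAULT) of Source B
def pvRules : List (List String × String) :=
  [ (["example", "specific"], "Can you provide a specific example with measurable results?"),
    (["structure", "star"], "Can you walk me through the situation, your specific actions, and the results?"),
    (["detail"], "Can you elaborate on that with more context and details?") ]

def pvDefault : String := "Is there anything else you'd like to add to strengthen your answer?"

-- Source B's _category: index of the first matching rule, len(_RULES) if none
def pvCategory (imp : String) : Nat :=
  let low := PySem.Str.lower imp
  (pvRules.findIdx? (fun r => r.1.any (fun k => PySem.Str.isIn k low))).getD pvRules.length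

def generate_followup_py_alt (original_question : String) (improvements : List String) : String :=
  let responses := pvRules.map Prod.snd ++ [pvDefault]
  -- min(map(_category, improvements), default=len(_RULES)): foldl min from the default is exact
  -- here because every category is ≤ len(_RULES)
  let best := (improvements.map pvCategory).foldl min pvRules.length
  responses.getD best pvDefault

-- ===== PRECONDITION & SPEC =====
def Spec_generate_followup_py (original_question : String) (improvements : List String) (out : String) : Prop := out = generate_followup_py_alt original_question improvements
instance (original_question : String) (improvements : List String) (out : String) : Decidable (Spec_generate_followup_py original_question improvements out) := by unfold Spec_generate_followup_py; infer_instance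

-- ===== CLAIM (what is proved, stated in full; the proofs are below) =====
def Claim_equal_generate_followup_py : Prop := ∀ (original_question : String) (improvements : List String), Dom_generate_followup_py original_question improvements → Spec_generate_followup_py original_question improvements (generate_followup_py original_question improvements)

-- ===== LEMMAS AND PROOFS =====

-- the three per-element tests of A
def pvEx (imp : String) : Bool :=
  PySem.Str.isIn "example" (PySem.Str.lower imp) || PySem.Str.isIn "specific" (PySem.Str.lower imp)
def pvSt (imp : String) : Bool :=
  PySem.Str.isIn "structure" (PySem.Str.lower imp) || PySem.Str.isIn "star" (PySem.Str.lower imp)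
def pvDe (imp : String) : Bool :=
  PySem.Str.isIn "detail" (PySem.Str.lower imp)

theorem pvCategory_eq (x : String) :
    pvCategory x = if pvEx x then 0 else if pvSt x then 1 else if pvDe x then 2 else 3 := by
  unfold pvCategory pvRules pvEx pvSt pvDe
  cases h1 : PySem.Str.isIn "example" (PySem.Str.lower x) <;>
    cases h2 : PySem.Str.isIn "specific" (PySem.Str.lower x) <;>
      cases h3 : PySem.Str.isIn "structure" (PySem.Str.lower x) <;>
        cases h4 : PySem.Str.isIn "star" (PySem.Str.lower x) <;>
          cases h5 : PySem.Str.isIn "detail" (PySem.Str.lower x) <;>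
            (simp at h1 h2 h3 h4 h5; simp [List.findIdx?, List.findIdx?.go, h1, h2, h3, h4, h5])

def pvLevel (l : List String) : Nat :=
  if l.any pvEx then 0 else if l.any pvSt then 1 else if l.any pvDe then 2 else 3

theorem pv_fold_min (l : List String) : ∀ a : Nat, a ≤ 3 →
    (l.map pvCategory).foldl min a = min a (pvLevel l) := by
  induction l with
  | nil => intro a ha; simp [pvLevel]; omega
  | cons x xs ih =>
    intro a ha
    simp only [List.map_cons, List.foldl_cons]
    rw [ih (min a (pvCategory x)) (by rw [pvCategory_eq]; split_ifs <;> omega)]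
    have hcons : pvLevel (x :: xs) =
        min (if pvEx x then 0 else if pvSt x then 1 else if pvDe x then 2 else 3) (pvLevel xs) := by
      unfold pvLevel
      simp only [List.any_cons, Bool.or_eq_true]
      cases hx1 : pvEx x <;> cases hx2 : pvSt x <;> cases hx3 : pvDe x <;>
        simp <;> split_ifs <;> omega
    rw [hcons, pvCategory_eq, Nat.min_assoc]

-- ===== VERDICT (by name: the statement is the Claim_ definition above) =====
theorem generate_followup_py_spec : Claim_equal_generate_followup_py := by
  intro q imps _
  unfold Spec_generate_followup_py generate_followup_py generate_followup_py_alt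
  show _ = (pvRules.map Prod.snd ++ [pvDefault]).getD
      ((imps.map pvCategory).foldl min pvRules.length) pvDefault
  rw [show pvRules.length = 3 from rfl, pv_fold_min imps 3 (le_refl 3)]
  unfold pvLevel
  rw [show (fun imp => PySem.Str.isIn "example" (PySem.Str.lower imp) || PySem.Str.isIn "specific" (PySem.Str.lower imp)) = pvEx from rfl,
      show (fun imp => PySem.Str.isIn "structure" (PySem.Str.lower imp) || PySem.Str.isIn "star" (PySem.Str.lower imp)) = pvSt from rfl,
      show (fun imp => PySem.Str.isIn "detail" (PySem.Str.lower imp)) = pvDe from rfl]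
  cases h1 : imps.any pvEx <;> cases h2 : imps.any pvSt <;> cases h3 : imps.any pvDe <;>
    simp [h1, h2, h3, pvRules, pvDefault]
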